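-- pv_equiv track=rewrite | github.com/PowerBarcoder/PowerBarcoder | main/denoise/error_learning_2nd_selector.py | get_common_and_unique_samples
-- ===== SOURCE A (Python) =====
-- def get_common_and_unique_samples(r1_files, r2_files):
--     """
--     Identify common and unique samples between R1 and R2 files.
--
--     Args:
--         r1_files (list): List of R1 filenames
--         r2_files (list): List of R2 filenames
--
--     Returns:
--         tuple: Sets of common filenames, unique R1 filenames, and unique R2 filenames
--     """
--     common_filename_set = set()
--     unique_r1_set = set()
--     unique_r2_set = set()
--
--     for f1 in r1_files:
--         sample1 = f1.replace('_r1_', '_')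
--         found = False
--         for f2 in r2_files:
--             sample2 = f2.replace('_r2_', '_')
--             if sample1 == sample2:
--                 common_filename_set.add(sample1)
--                 found = True
--                 break
--         if not found:
--             unique_r1_set.add(sample1)
--
--     for f2 in r2_files:
--         sample2 = f2.replace('_r2_', '_')
--         if sample2 not in common_filename_set:
--             unique_r2_set.add(sample2)
--
--     return common_filename_set, unique_r1_set, unique_r2_set
-- ===== SOURCE B (Python) =====
-- def get_common_and_unique_samples(r1_files, r2_files):
--     """Set-algebra re-implementation: build the two normalized name sets once,
--     then use intersection/difference instead of nested per-pair scanning."""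
--     r1n = {f1.replace('_r1_', '_') for f1 in r1_files}
--     r2n = {f2.replace('_r2_', '_') for f2 in r2_files}
--     return r1n & r2n, r1n - r2n, r2n - r1n
-- ===== Notes on version B (the rewrite author's own statement) =====
-- stated objective: faster
-- what changed: Replaces the nested per-pair scan (and the membership re-scan pass) by building the two normalized-name sets once and returning intersection and the two set differences.
import Mathlib
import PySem

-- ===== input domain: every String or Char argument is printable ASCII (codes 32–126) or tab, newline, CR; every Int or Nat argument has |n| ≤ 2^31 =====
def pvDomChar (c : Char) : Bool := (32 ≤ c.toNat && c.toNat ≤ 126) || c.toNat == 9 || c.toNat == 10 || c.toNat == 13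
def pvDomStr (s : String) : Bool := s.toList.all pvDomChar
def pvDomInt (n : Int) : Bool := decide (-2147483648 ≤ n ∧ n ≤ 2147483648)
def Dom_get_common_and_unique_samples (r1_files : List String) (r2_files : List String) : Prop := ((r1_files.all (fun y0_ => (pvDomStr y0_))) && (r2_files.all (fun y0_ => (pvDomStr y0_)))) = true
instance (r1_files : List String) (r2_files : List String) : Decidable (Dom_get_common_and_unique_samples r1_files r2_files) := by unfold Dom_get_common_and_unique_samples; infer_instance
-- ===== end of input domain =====

-- B builds the two normalized-name sets once and returns intersection / differences
-- instead of A's nested per-pair scanning (objective: faster, asymptotic).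


-- ===== PORT A =====
-- the inner 'for f2 in r2_files: … break' loop: True iff some f2 normalizes to sample1
def pvFoundA (sample1 : String) : List String → Bool
  | [] => false
  | f2 :: rest =>
      let sample2 := PySem.Str.replace f2 "_r2_" "_"
      if sample1 == sample2 then true else pvFoundA sample1 rest

def get_common_and_unique_samples (r1_files : List String) (r2_files : List String) :
    List String × List String × List String :=
  let st := r1_files.foldl
    (fun (st : PySem.Set String × PySem.Set String) f1 =>
      let sample1 := PySem.Str.replace f1 "_r1_" "_"
      if pvFoundA sample1 r2_files then (PySem.Set.add st.1 sample1, st.2)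
      else (st.1, PySem.Set.add st.2 sample1))
    (PySem.Set.empty, PySem.Set.empty)
  let common_filename_set := st.1
  let unique_r2_set := r2_files.foldl
    (fun (s : PySem.Set String) f2 =>
      let sample2 := PySem.Str.replace f2 "_r2_" "_"
      if PySem.Set.contains common_filename_set sample2 then s else PySem.Set.add s sample2)
    PySem.Set.empty
  (common_filename_set, st.2, unique_r2_set)

-- ===== PORT B =====
def get_common_and_unique_samples_alt (r1_files : List String) (r2_files : List String) :
    List String × List String × List String :=
  let r1n : PySem.Set String := PySem.Set.ofList (r1_files.map (fun f1 => PySem.Str.replace f1 "_r1_" "_"))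
  let r2n : PySem.Set String := PySem.Set.ofList (r2_files.map (fun f2 => PySem.Str.replace f2 "_r2_" "_"))
  (PySem.Set.inter r1n r2n, PySem.Set.diff r1n r2n, PySem.Set.diff r2n r1n)

-- ===== PRECONDITION & SPEC =====
def Spec_get_common_and_unique_samples (r1_files : List String) (r2_files : List String) (out : List String × List String × List String) : Prop := out = get_common_and_unique_samples_alt r1_files r2_files
instance (r1_files : List String) (r2_files : List String) (out : List String × List String × List String) : Decidable (Spec_get_common_and_unique_samples r1_files r2_files out) := by unfold Spec_get_common_and_unique_samples; infer_instance

-- ===== CLAIM (what is proved, stated in full; the proofs are below) =====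
def Claim_equal_get_common_and_unique_samples : Prop := ∀ (r1_files : List String) (r2_files : List String), Dom_get_common_and_unique_samples r1_files r2_files → Spec_get_common_and_unique_samples r1_files r2_files (get_common_and_unique_samples r1_files r2_files)

-- ===== LEMMAS AND PROOFS =====

-- the inner scan finds sample1 iff it is among the normalized r2 names
theorem pvFoundA_iff (x : String) (l : List String) :
    pvFoundA x l = true ↔ x ∈ l.map (fun f2 => PySem.Str.replace f2 "_r2_" "_") := by
  induction l with
  | nil => simp [pvFoundA]
  | cons f2 rest ih =>
      simp only [pvFoundA, List.map_cons, List.mem_cons]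
      split_ifs with h
      · simp [beq_iff_eq] at h
        simp [h]
      · simp [beq_iff_eq] at h
        simp [ih, h]

-- A's first loop, split: each element goes into exactly one of the two sets
theorem foldl_split (p : String → Bool) (l : List String) (a b : PySem.Set String) :
    l.foldl (fun (st : PySem.Set String × PySem.Set String) x =>
        if p x then (PySem.Set.add st.1 x, st.2) else (st.1, PySem.Set.add st.2 x)) (a, b)
      = (PySem.Set.update a (l.filter p), PySem.Set.update b (l.filter (fun x => !p x))) := by
  induction l generalizing a b with
  | nil => simp [PySem.Set.update]
  | cons x rest ih =>
      simp only [List.foldl_cons, List.filter_cons]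
      by_cases h : p x = true
      · simp [h, ih, PySem.Set.update_cons]
      · simp [Bool.not_eq_true] at h
        simp [h, ih, PySem.Set.update_cons]

-- A's second loop as an update with a filter
theorem foldl_keep (q : String → Bool) (l : List String) (a : PySem.Set String) :
    l.foldl (fun (s : PySem.Set String) x => if q x then s else PySem.Set.add s x) a
      = PySem.Set.update a (l.filter (fun x => !q x)) := by
  induction l generalizing a with
  | nil => simp [PySem.Set.update]
  | cons x rest ih =>
      simp only [List.foldl_cons, List.filter_cons]
      by_cases h : q x = true
      · simp [h, ih]
      · simp [Bool.not_eq_true] at h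
        simp [h, ih, PySem.Set.update_cons]

-- dedup commutes with filter
theorem ofList_filter (p : String → Bool) (l : List String) :
    PySem.Set.ofList (l.filter p) = (PySem.Set.ofList l).filter p := by
  induction l with
  | nil => rfl
  | cons x rest ih =>
      by_cases h : p x = true
      · simp only [List.filter_cons, h, if_pos, PySem.Set.ofList_cons, ih]
        simp [PySem.Set.discard, List.filter_filter]
        congr 1
        funext y
        rw [Bool.and_comm]
      · simp only [List.filter_cons, PySem.Set.ofList_cons]
        simp [Bool.not_eq_true] at h
        simp [h, ih, PySem.Set.discard, List.filter_filter]
        apply List.filter_congr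
        intro y _
        by_cases hy : y = x
        · simp [hy, h]
        · simp [hy]

theorem get_common_and_unique_samples_spec' (r1_files r2_files : List String) :
    get_common_and_unique_samples r1_files r2_files
      = get_common_and_unique_samples_alt r1_files r2_files := by
  unfold get_common_and_unique_samples get_common_and_unique_samples_alt
  set l1 := r1_files.map (fun f1 => PySem.Str.replace f1 "_r1_" "_") with hl1
  set l2 := r2_files.map (fun f2 => PySem.Str.replace f2 "_r2_" "_") with hl2
  set p : String → Bool := fun x => pvFoundA x r2_files with hp
  have hpmem : ∀ x, p x = PySem.Set.contains (PySem.Set.ofList l2) x := by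
    intro x
    rw [Bool.eq_iff_iff]
    show pvFoundA x r2_files = true ↔ _
    rw [pvFoundA_iff, PySem.Set.contains_iff, PySem.Set.mem_ofList, hl2]
  have hfold1 : r1_files.foldl
      (fun (st : PySem.Set String × PySem.Set String) f1 =>
        if pvFoundA (PySem.Str.replace f1 "_r1_" "_") r2_files then
          (PySem.Set.add st.1 (PySem.Str.replace f1 "_r1_" "_"), st.2)
        else (st.1, PySem.Set.add st.2 (PySem.Str.replace f1 "_r1_" "_")))
      (PySem.Set.empty, PySem.Set.empty)
      = (PySem.Set.ofList (l1.filter p), PySem.Set.ofList (l1.filter (fun x => !p x))) := by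
    rw [hl1]
    refine (List.foldl_map (f := fun f1 => PySem.Str.replace f1 "_r1_" "_")
      (g := fun (st : PySem.Set String × PySem.Set String) x =>
        if p x then (PySem.Set.add st.1 x, st.2) else (st.1, PySem.Set.add st.2 x))
      (l := r1_files) (init := (PySem.Set.empty, PySem.Set.empty))).symm.trans ?_
    rw [foldl_split p (r1_files.map (fun f1 => PySem.Str.replace f1 "_r1_" "_"))
          PySem.Set.empty PySem.Set.empty]
    simp [PySem.Set.update_nil_left, PySem.Set.empty]
  have hcommon : PySem.Set.ofList (l1.filter p)
      = PySem.Set.inter (PySem.Set.ofList l1) (PySem.Set.ofList l2) := by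
    rw [ofList_filter]
    show _ = (PySem.Set.ofList l1).filter (fun x => PySem.Set.contains (PySem.Set.ofList l2) x)
    exact List.filter_congr (fun x _ => hpmem x)
  have huniq1 : PySem.Set.ofList (l1.filter (fun x => !p x))
      = PySem.Set.diff (PySem.Set.ofList l1) (PySem.Set.ofList l2) := by
    rw [ofList_filter]
    show _ = (PySem.Set.ofList l1).filter (fun x => !PySem.Set.contains (PySem.Set.ofList l2) x)
    exact List.filter_congr (fun x _ => by rw [hpmem x])
  have hfold2 : r2_files.foldl
      (fun (s : PySem.Set String) f2 =>
        if PySem.Set.contains (PySem.Set.ofList (l1.filter p)) (PySem.Str.replace f2 "_r2_" "_") then s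
        else PySem.Set.add s (PySem.Str.replace f2 "_r2_" "_")) PySem.Set.empty
      = PySem.Set.diff (PySem.Set.ofList l2) (PySem.Set.ofList l1) := by
    rw [hl2]
    refine (List.foldl_map (f := fun f2 => PySem.Str.replace f2 "_r2_" "_")
      (g := fun (s : PySem.Set String) x =>
        if PySem.Set.contains (PySem.Set.ofList (l1.filter p)) x then s else PySem.Set.add s x)
      (l := r2_files) (init := PySem.Set.empty)).symm.trans ?_
    rw [foldl_keep _ (r2_files.map (fun f2 => PySem.Str.replace f2 "_r2_" "_")) PySem.Set.empty]
    simp only [PySem.Set.empty]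
    rw [PySem.Set.update_nil_left, ofList_filter]
    show _ = (PySem.Set.ofList (r2_files.map (fun f2 => PySem.Str.replace f2 "_r2_" "_"))).filter
      (fun x => !PySem.Set.contains (PySem.Set.ofList l1) x)
    apply List.filter_congr
    intro x hx
    rw [PySem.Set.mem_ofList] at hx
    congr 1
    -- for x among the normalized r2 names, membership in A's common set = membership in set(l1)
    rw [Bool.eq_iff_iff, PySem.Set.contains_iff, PySem.Set.contains_iff,
        ofList_filter, List.mem_filter]
    constructor
    · intro hc; exact hc.1
    · intro hc
      refine ⟨hc, ?_⟩
      rw [hpmem x, PySem.Set.contains_iff, PySem.Set.mem_ofList]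
      exact hx
  rw [hfold1]
  simp only []
  rw [hfold2, hcommon, huniq1]

-- ===== VERDICT (by name: the statement is the Claim_ definition above) =====
theorem get_common_and_unique_samples_spec : Claim_equal_get_common_and_unique_samples := by
  intro r1 r2 _
  exact get_common_and_unique_samples_spec' r1 r2
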